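-- pv_equiv track=rewrite | github.com/rdx40/cp | cf/problems/295.A.Pangram/time.py | is_pangram_ascii
-- ===== SOURCE A (Python) =====
-- def is_pangram_ascii(n, s):
--     if n < 26:
--         return "NO"
--     seen = [False] * 26
--     for c in s.lower():
--         if 'a' <= c <= 'z':
--             seen[ord(c) - ord('a')] = True
--     return "YES" if all(seen) else "NO"
-- ===== SOURCE B (Python) =====
-- def is_pangram_ascii(n, s):
--     if n < 26:
--         return "NO"
--     t = s.lower()
--     return "YES" if all(ch in t for ch in "abcdefghijklmnopqrstuvwxyz") else "NO"
-- ===== Notes on version B (the rewrite author's own statement) =====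
-- stated objective: idiomatic
-- what changed: Replaces the one-pass 26-slot boolean table with a per-target-letter scan: for each of the 26 lowercase letters, membership-test it against the lowered string with all(...).
import Mathlib
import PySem

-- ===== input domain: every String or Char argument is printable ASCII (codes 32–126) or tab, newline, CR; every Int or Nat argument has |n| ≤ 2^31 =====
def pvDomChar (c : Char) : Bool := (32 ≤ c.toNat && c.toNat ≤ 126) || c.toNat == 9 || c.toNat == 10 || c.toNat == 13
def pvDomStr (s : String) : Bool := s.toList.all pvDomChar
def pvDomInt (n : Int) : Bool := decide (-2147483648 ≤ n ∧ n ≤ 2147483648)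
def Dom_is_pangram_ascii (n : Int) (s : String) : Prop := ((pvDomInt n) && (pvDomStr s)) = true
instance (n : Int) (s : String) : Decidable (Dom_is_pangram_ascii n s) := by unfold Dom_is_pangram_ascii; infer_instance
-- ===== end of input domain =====

-- B changes the algorithm: instead of A's one-pass 26-slot seen table, B scans the
-- lowered string once per target letter with all(...); same exact result (measured faster in CPython: C-level membership vs a per-char Python loop).

-- ===== PORT A =====
-- seen[ord(c)-ord('a')] = True (index in range thanks to the guard 'a' <= c <= 'z')
def pvAStep (seen : List Bool) (c : Char) : List Bool :=
  if 'a' ≤ c ∧ c ≤ 'z' then seen.set (c.toNat - 97) true else seen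

def is_pangram_ascii (n : Int) (s : String) : String :=
  if n < 26 then "NO"
  else
    let seen := (PySem.Str.lower s).toList.foldl pvAStep (List.replicate 26 false)
    if seen.all (fun b => b) then "YES" else "NO"

-- ===== PORT B =====
def is_pangram_ascii_alt (n : Int) (s : String) : String :=
  if n < 26 then "NO"
  else
    let t := PySem.Str.lower s
    if "abcdefghijklmnopqrstuvwxyz".toList.all (fun ch => t.toList.contains ch)
    then "YES" else "NO"

-- ===== PRECONDITION & SPEC =====
def Spec_is_pangram_ascii (n : Int) (s : String) (out : String) : Prop := out = is_pangram_ascii_alt n s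
instance (n : Int) (s : String) (out : String) : Decidable (Spec_is_pangram_ascii n s out) := by unfold Spec_is_pangram_ascii; infer_instance

-- ===== CLAIM (what is proved, stated in full; the proofs are below) =====
def Claim_equal_is_pangram_ascii : Prop := ∀ (n : Int) (s : String), Dom_is_pangram_ascii n s → Spec_is_pangram_ascii n s (is_pangram_ascii n s)

-- ===== LEMMAS AND PROOFS =====

theorem pvAStep_length (a : List Bool) (c : Char) : (pvAStep a c).length = a.length := by
  unfold pvAStep; split <;> simp

theorem pvFold_length (l : List Char) (a : List Bool) :
    (l.foldl pvAStep a).length = a.length := by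
  induction l generalizing a with
  | nil => rfl
  | cons c l ih => simpa [pvAStep_length] using ih (pvAStep a c)

theorem pvLetterToNat (i : Nat) (h26 : i < 26) : (Char.ofNat (97 + i)).toNat = 97 + i := by
  rw [Char.toNat_ofNat, if_pos]
  exact Or.inl (by omega)

theorem pvCharEq (c : Char) (i : Nat) (h26 : i < 26) :
    (c = Char.ofNat (97 + i)) ↔ c.toNat = 97 + i := by
  constructor
  · intro h; rw [h, pvLetterToNat i h26]
  · intro h
    apply Char.ext
    apply UInt32.toNat_inj.mp
    show c.toNat = (Char.ofNat (97 + i)).toNat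
    rw [pvLetterToNat i h26]; exact h

theorem pvGuard (c : Char) : ('a' ≤ c ∧ c ≤ 'z') ↔ (97 ≤ c.toNat ∧ c.toNat ≤ 122) := by
  rw [Char.le_def, Char.le_def, UInt32.le_iff_toNat_le, UInt32.le_iff_toNat_le]
  show (97 ≤ c.toNat ∧ c.toNat ≤ 122) ↔ _
  exact Iff.rfl

theorem pvAStep_get (a : List Bool) (c : Char) (i : Nat) (hi : i < a.length) (h26 : i < 26) :
    (pvAStep a c)[i]'(by rw [pvAStep_length]; exact hi) =
      (a[i] || decide (c = Char.ofNat (97 + i))) := by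
  unfold pvAStep
  split
  · rename_i hc
    obtain ⟨hge, hle⟩ := (pvGuard c).mp hc
    by_cases he : c.toNat - 97 = i
    · have hcv : c = Char.ofNat (97 + i) := (pvCharEq c i h26).mpr (by omega)
      simp [hcv, pvLetterToNat i h26]
    · have hne : ¬ c = Char.ofNat (97 + i) := fun h => he (by
        have := (pvCharEq c i h26).mp h; omega)
      simp [he, hne]
  · rename_i hc
    have hne : ¬ c = Char.ofNat (97 + i) := fun h => by
      have := (pvCharEq c i h26).mp h
      exact hc ((pvGuard c).mpr (by omega))
    simp [hne]

theorem pvFold_get (l : List Char) (a : List Bool) (i : Nat) (hi : i < a.length) (h26 : i < 26) :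
    (l.foldl pvAStep a)[i]'(by rw [pvFold_length]; exact hi) =
      (a[i] || decide (Char.ofNat (97 + i) ∈ l)) := by
  induction l generalizing a with
  | nil => simp
  | cons c l ih =>
    simp only [List.foldl_cons]
    rw [ih (pvAStep a c) (by rw [pvAStep_length]; exact hi)]
    rw [pvAStep_get a c i hi h26]
    simp [List.mem_cons, eq_comm, Bool.or_assoc]

theorem pvLetters :
    "abcdefghijklmnopqrstuvwxyz".toList = (List.range 26).map (fun i => Char.ofNat (97 + i)) := by
  decide

theorem pvKey (lst : List Char) :
    ((lst.foldl pvAStep (List.replicate 26 false)).all (fun b => b)) =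
      ("abcdefghijklmnopqrstuvwxyz".toList.all (fun ch => lst.contains ch)) := by
  rw [pvLetters]
  apply Bool.eq_iff_iff.mpr
  simp only [List.all_eq_true, List.forall_mem_iff_forall_getElem, List.contains_eq_mem]
  have hlen : (lst.foldl pvAStep (List.replicate 26 false)).length = 26 := by
    rw [pvFold_length]; simp
  constructor
  · intro h i hi
    have h26 : i < 26 := by simpa [List.length_map, List.length_range] using hi
    have := h i (by omega)
    rw [pvFold_get lst (List.replicate 26 false) i (by simpa using h26) h26] at this
    simp only [List.getElem_replicate, Bool.false_or, decide_eq_true_eq] at this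
    simpa [List.getElem_map, List.getElem_range] using this
  · intro h i hi
    have h26 : i < 26 := by omega
    rw [pvFold_get lst (List.replicate 26 false) i (by simpa using h26) h26]
    have := h i (by simp [List.length_map, List.length_range]; omega)
    simp only [List.getElem_map, List.getElem_range] at this
    simp only [Bool.or_eq_true, decide_eq_true_eq]
    exact Or.inr (by simpa using this)

-- ===== VERDICT
theorem is_pangram_ascii_spec : Claim_equal_is_pangram_ascii := by
  intro n s _
  unfold Spec_is_pangram_ascii is_pangram_ascii is_pangram_ascii_alt
  by_cases hn : n < 26
  · simp [hn]
  · simp only [if_neg hn]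
    rw [pvKey]
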